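-- pv_equiv track=rewrite | github.com/DiscoveryPiscine42Bangkok2025/discovery-piscine-coding-with-python-khunat123 | rush/ex00/checkmate.py | check_rook
-- ===== SOURCE A (Python) =====
-- def check_rook(board_rows, piece, r_idx, c_idx):
--     if piece == "R":
--         attack_directions = [
--             (-1, 0),
--             (1, 0),
--             (0, -1),
--             (0, 1)
--         ]
--         for dr, dc in attack_directions:
--             current_row, current_col = r_idx+dr, c_idx+dc
--             while 0 <= current_row < len(board_rows) and 0 <= current_col < len(board_rows[0]):
--                 if board_rows[current_row][current_col] == "K":
--                     return True
--                 current_row += dr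
--                 current_col += dc
--     return False
-- ===== SOURCE B (Python) =====
-- def check_rook(board_rows, piece, r_idx, c_idx):
--     if piece != "R":
--         return False
--     row_hit = any(ch == "K" for j, ch in enumerate(board_rows[r_idx]) if j != c_idx)
--     col_hit = any(row[c_idx] == "K" for i, row in enumerate(board_rows) if i != r_idx)
--     return row_hit or col_hit
-- ===== Notes on version B (the rewrite author's own statement) =====
-- stated objective: simpler
-- what changed: Replaces the four outward directional while-walks with an early guard on the piece plus two flat any-scans over the rook's row and column; Pre_ restricts to rectangular boards with the rook's coordinates on the board, because on ragged boards A raises IndexError or its fixed column bound len(board_rows[0]) silently truncates the scan, and for off-board coordinates (including the empty board) A's value is an accident of which one-step-outside cells its walks happen to enter from.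
-- outside the precondition, e.g. on check_rook([], 'R', 0, 0): A returns False, B raises IndexError; on check_rook(['..', 'K.'], 'R', -1, 1): A returns False, B returns True; on check_rook(['.', '.K'], 'R', 1, 0): A returns False, B returns True
import Mathlib
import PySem

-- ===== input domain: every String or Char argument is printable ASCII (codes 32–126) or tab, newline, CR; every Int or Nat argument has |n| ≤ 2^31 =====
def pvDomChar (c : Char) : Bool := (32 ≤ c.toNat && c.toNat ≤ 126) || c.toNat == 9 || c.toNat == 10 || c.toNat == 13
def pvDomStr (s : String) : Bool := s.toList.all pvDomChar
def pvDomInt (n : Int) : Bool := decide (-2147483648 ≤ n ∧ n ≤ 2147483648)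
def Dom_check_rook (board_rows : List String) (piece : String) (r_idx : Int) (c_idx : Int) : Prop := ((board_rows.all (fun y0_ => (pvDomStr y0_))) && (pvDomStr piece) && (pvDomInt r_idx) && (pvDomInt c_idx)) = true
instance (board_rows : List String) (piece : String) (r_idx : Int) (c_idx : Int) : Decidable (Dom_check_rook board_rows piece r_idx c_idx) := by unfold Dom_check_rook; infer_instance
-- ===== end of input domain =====

-- B replaces A's four outward directional while-walks by a guard on the piece plus two flat
-- any-scans over the rook's row and column; the equivalence is about the return value only.

-- ===== PORT A =====
-- board_rows[i][j] == "K" (A's cell read; on the rectangular in-range inputs Pre_ admits the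
-- .getD defaults are never reached)
def pvIsK (board_rows : List String) (i j : Int) : Bool :=
  ((PySem.List.pyGet? ((PySem.List.pyGet? board_rows i).getD "").toList j).getD ' ') == 'K'

-- the while-loop of A: step by (dr,dc) while inside the n×m box, looking for "K".
-- fuel only makes the recursion structural: each in-range iteration moves one step along a
-- line inside the box, so n+m+2 iterations always reach the exit condition first.
def pvWalkA (board_rows : List String) (n m dr dc : Int) : Int → Int → Nat → Bool
  | _, _, 0 => false
  | row, col, fuel+1 =>
    if 0 ≤ row ∧ row < n ∧ 0 ≤ col ∧ col < m then
      if pvIsK board_rows row col then true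
      else pvWalkA board_rows n m dr dc (row + dr) (col + dc) fuel
    else false

def check_rook (board_rows : List String) (piece : String) (r_idx : Int) (c_idx : Int) : Bool :=
  if piece == "R" then
    ([((-1 : Int), (0 : Int)), (1, 0), (0, -1), (0, 1)]).any (fun d =>
      pvWalkA board_rows (board_rows.length : Int) ((board_rows.headD "").toList.length : Int)
        d.1 d.2 (r_idx + d.1) (c_idx + d.2)
        (board_rows.length + (board_rows.headD "").toList.length + 2))
  else false

-- ===== PORT B =====
def check_rook_alt (board_rows : List String) (piece : String) (r_idx : Int) (c_idx : Int) : Bool :=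
  if piece != "R" then false
  else
    let rowHit : Bool :=
      (PySem.List.enumerate ((PySem.List.pyGet? board_rows r_idx).getD "").toList 0).any
        (fun p => p.2 == 'K' && decide (p.1 ≠ c_idx))
    let colHit : Bool :=
      (PySem.List.enumerate board_rows 0).any
        (fun p => decide (p.1 ≠ r_idx) && (((PySem.List.pyGet? p.2.toList c_idx).getD ' ') == 'K'))
    rowHit || colHit

-- ===== PRECONDITION & SPEC =====
-- When the piece is "R", Pre_ keeps only rectangular boards with the rook's coordinates on the
-- board: on ragged boards A raises IndexError or its fixed column bound len(board_rows[0])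
-- silently truncates the scan, and for off-board coordinates (including the empty board) A's
-- value is an accident of which one-step-outside cells its four walks happen to enter from
-- (B raises or scans the wrapped row there).
def Pre_check_rook (board_rows : List String) (piece : String) (r_idx : Int) (c_idx : Int) : Prop :=
  piece ≠ "R" ∨
    ((∀ s ∈ board_rows, s.toList.length = (board_rows.headD "").toList.length) ∧
     0 ≤ r_idx ∧ r_idx < (board_rows.length : Int) ∧
     0 ≤ c_idx ∧ c_idx < ((board_rows.headD "").toList.length : Int))
instance (board_rows : List String) (piece : String) (r_idx : Int) (c_idx : Int) : Decidable (Pre_check_rook board_rows piece r_idx c_idx) := by unfold Pre_check_rook; infer_instance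

def pvWitness_check_rook : List String × String × Int × Int := (["RK", ".."], "R", 0, 0)

def Spec_check_rook (board_rows : List String) (piece : String) (r_idx : Int) (c_idx : Int) (out : Bool) : Prop := out = check_rook_alt board_rows piece r_idx c_idx
instance (board_rows : List String) (piece : String) (r_idx : Int) (c_idx : Int) (out : Bool) : Decidable (Spec_check_rook board_rows piece r_idx c_idx out) := by unfold Spec_check_rook; infer_instance

-- ===== CLAIM (what is proved, stated in full; the proofs are below) =====
def Claim_equal_check_rook : Prop := ∀ (board_rows : List String) (piece : String) (r_idx : Int) (c_idx : Int), Dom_check_rook board_rows piece r_idx c_idx → Pre_check_rook board_rows piece r_idx c_idx → Spec_check_rook board_rows piece r_idx c_idx (check_rook board_rows piece r_idx c_idx)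

-- ===== LEMMAS AND PROOFS =====

-- characterizations of each directional walk of A (n, m arbitrary bounds)
theorem pvWalk_left (board : List String) (n m : Int) :
    ∀ (fuel : Nat) (r c : Int),
      pvWalkA board n m 0 (-1) r c fuel = true ↔
      (0 ≤ r ∧ r < n ∧ 0 ≤ c ∧ c < m ∧
        ∃ j : Int, 0 ≤ j ∧ j ≤ c ∧ c - j < fuel ∧ pvIsK board r j = true) := by
  intro fuel
  induction fuel with
  | zero =>
    intro r c
    constructor
    · intro h; simp [pvWalkA] at h
    · rintro ⟨_, _, _, _, j, hj0, hjc, hlt, _⟩; omega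
  | succ fuel ih =>
    intro r c
    simp only [pvWalkA]
    by_cases hg : 0 ≤ r ∧ r < n ∧ 0 ≤ c ∧ c < m
    · rw [if_pos hg]
      by_cases hK : pvIsK board r c = true
      · simp only [hK, if_true, true_iff]
        exact ⟨hg.1, hg.2.1, hg.2.2.1, hg.2.2.2, c, hg.2.2.1, le_refl c, by omega, hK⟩
      · rw [if_neg hK, show r + (0:Int) = r by ring, show c + (-1:Int) = c - 1 by ring,
          ih r (c - 1)]
        constructor
        · rintro ⟨h1, h2, h3, h4, j, hj0, hjc, hlt, hKj⟩
          exact ⟨hg.1, hg.2.1, hg.2.2.1, hg.2.2.2, j, hj0, by omega, by omega, hKj⟩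
        · rintro ⟨h1, h2, h3, h4, j, hj0, hjc, hlt, hKj⟩
          have hne : j ≠ c := by rintro rfl; exact hK hKj
          exact ⟨h1, h2, by omega, by omega, j, hj0, by omega, by omega, hKj⟩
    · rw [if_neg hg]
      constructor
      · intro h; cases h
      · rintro ⟨h1, h2, h3, h4, -⟩; exact absurd ⟨h1, h2, h3, h4⟩ hg

theorem pvWalk_right (board : List String) (n m : Int) :
    ∀ (fuel : Nat) (r c : Int),
      pvWalkA board n m 0 1 r c fuel = true ↔
      (0 ≤ r ∧ r < n ∧ 0 ≤ c ∧ c < m ∧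
        ∃ j : Int, c ≤ j ∧ j < m ∧ j - c < fuel ∧ pvIsK board r j = true) := by
  intro fuel
  induction fuel with
  | zero =>
    intro r c
    constructor
    · intro h; simp [pvWalkA] at h
    · rintro ⟨_, _, _, _, j, hjc, hjm, hlt, _⟩; omega
  | succ fuel ih =>
    intro r c
    simp only [pvWalkA]
    by_cases hg : 0 ≤ r ∧ r < n ∧ 0 ≤ c ∧ c < m
    · rw [if_pos hg]
      by_cases hK : pvIsK board r c = true
      · simp only [hK, if_true, true_iff]
        exact ⟨hg.1, hg.2.1, hg.2.2.1, hg.2.2.2, c, le_refl c, hg.2.2.2, by omega, hK⟩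
      · rw [if_neg hK, show r + (0:Int) = r by ring, ih r (c + 1)]
        constructor
        · rintro ⟨h1, h2, h3, h4, j, hjc, hjm, hlt, hKj⟩
          exact ⟨hg.1, hg.2.1, hg.2.2.1, hg.2.2.2, j, by omega, hjm, by omega, hKj⟩
        · rintro ⟨h1, h2, h3, h4, j, hjc, hjm, hlt, hKj⟩
          have hne : j ≠ c := by rintro rfl; exact hK hKj
          exact ⟨h1, h2, by omega, by omega, j, by omega, hjm, by omega, hKj⟩
    · rw [if_neg hg]
      constructor
      · intro h; cases h
      · rintro ⟨h1, h2, h3, h4, -⟩; exact absurd ⟨h1, h2, h3, h4⟩ hg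

theorem pvWalk_up (board : List String) (n m : Int) :
    ∀ (fuel : Nat) (r c : Int),
      pvWalkA board n m (-1) 0 r c fuel = true ↔
      (0 ≤ c ∧ c < m ∧ 0 ≤ r ∧ r < n ∧
        ∃ i : Int, 0 ≤ i ∧ i ≤ r ∧ r - i < fuel ∧ pvIsK board i c = true) := by
  intro fuel
  induction fuel with
  | zero =>
    intro r c
    constructor
    · intro h; simp [pvWalkA] at h
    · rintro ⟨_, _, _, _, i, hi0, hir, hlt, _⟩; omega
  | succ fuel ih =>
    intro r c
    simp only [pvWalkA]
    by_cases hg : 0 ≤ r ∧ r < n ∧ 0 ≤ c ∧ c < m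
    · rw [if_pos hg]
      by_cases hK : pvIsK board r c = true
      · simp only [hK, if_true, true_iff]
        exact ⟨hg.2.2.1, hg.2.2.2, hg.1, hg.2.1, r, hg.1, le_refl r, by omega, hK⟩
      · rw [if_neg hK, show c + (0:Int) = c by ring, show r + (-1:Int) = r - 1 by ring,
          ih (r - 1) c]
        constructor
        · rintro ⟨h1, h2, h3, h4, i, hi0, hir, hlt, hKi⟩
          exact ⟨hg.2.2.1, hg.2.2.2, hg.1, hg.2.1, i, hi0, by omega, by omega, hKi⟩
        · rintro ⟨h1, h2, h3, h4, i, hi0, hir, hlt, hKi⟩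
          have hne : i ≠ r := by rintro rfl; exact hK hKi
          exact ⟨h1, h2, by omega, by omega, i, hi0, by omega, by omega, hKi⟩
    · rw [if_neg hg]
      constructor
      · intro h; cases h
      · rintro ⟨h1, h2, h3, h4, -⟩; exact absurd ⟨h3, h4, h1, h2⟩ hg

theorem pvWalk_down (board : List String) (n m : Int) :
    ∀ (fuel : Nat) (r c : Int),
      pvWalkA board n m 1 0 r c fuel = true ↔
      (0 ≤ c ∧ c < m ∧ 0 ≤ r ∧ r < n ∧
        ∃ i : Int, r ≤ i ∧ i < n ∧ i - r < fuel ∧ pvIsK board i c = true) := by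
  intro fuel
  induction fuel with
  | zero =>
    intro r c
    constructor
    · intro h; simp [pvWalkA] at h
    · rintro ⟨_, _, _, _, i, hir, hin, hlt, _⟩; omega
  | succ fuel ih =>
    intro r c
    simp only [pvWalkA]
    by_cases hg : 0 ≤ r ∧ r < n ∧ 0 ≤ c ∧ c < m
    · rw [if_pos hg]
      by_cases hK : pvIsK board r c = true
      · simp only [hK, if_true, true_iff]
        exact ⟨hg.2.2.1, hg.2.2.2, hg.1, hg.2.1, r, le_refl r, hg.2.1, by omega, hK⟩
      · rw [if_neg hK, show c + (0:Int) = c by ring, ih (r + 1) c]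
        constructor
        · rintro ⟨h1, h2, h3, h4, i, hir, hin, hlt, hKi⟩
          exact ⟨hg.2.2.1, hg.2.2.2, hg.1, hg.2.1, i, by omega, hin, by omega, hKi⟩
        · rintro ⟨h1, h2, h3, h4, i, hir, hin, hlt, hKi⟩
          have hne : i ≠ r := by rintro rfl; exact hK hKi
          exact ⟨h1, h2, by omega, by omega, i, by omega, hin, by omega, hKi⟩
    · rw [if_neg hg]
      constructor
      · intro h; cases h
      · rintro ⟨h1, h2, h3, h4, -⟩; exact absurd ⟨h3, h4, h1, h2⟩ hg

-- B's column scan: any over enumerate(board_rows)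
theorem pvColscan (board : List String) (r c : Int) :
    ((PySem.List.enumerate board 0).any
        (fun p => decide (p.1 ≠ r) && (((PySem.List.pyGet? p.2.toList c).getD ' ') == 'K'))) = true ↔
    ∃ i : Int, 0 ≤ i ∧ i < (board.length : Int) ∧ i ≠ r ∧ pvIsK board i c = true := by
  rw [List.any_eq_true]
  constructor
  · rintro ⟨p, hp, hpf⟩
    rw [PySem.List.mem_enumerate_iff] at hp
    obtain ⟨k, hk, rfl⟩ := hp
    simp only [Bool.and_eq_true, decide_eq_true_eq, zero_add] at hpf
    refine ⟨(k : Int), by omega, by omega, hpf.1, ?_⟩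
    simp only [pvIsK, PySem.List.pyGet?_natCast, List.getElem?_eq_getElem hk, Option.getD_some]
    exact hpf.2
  · rintro ⟨i, hi0, hin, hir, hK⟩
    have hk : i.toNat < board.length := by omega
    refine ⟨(0 + (i.toNat : Int), board[i.toNat]), ?_, ?_⟩
    · rw [PySem.List.mem_enumerate_iff]; exact ⟨i.toNat, hk, rfl⟩
    · simp only [pvIsK, PySem.List.pyGet?_of_nonneg _ hi0] at hK
      rw [List.getElem?_eq_getElem hk, Option.getD_some] at hK
      simp only [Bool.and_eq_true, decide_eq_true_eq, zero_add]
      exact ⟨by omega, hK⟩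

-- B's row scan: any over enumerate of the r-th row
theorem pvRowscan (board : List String) (r c : Int) (hr0 : 0 ≤ r)
    (hrn : r < (board.length : Int)) :
    ((PySem.List.enumerate ((PySem.List.pyGet? board r).getD "").toList 0).any
      (fun p => p.2 == 'K' && decide (p.1 ≠ c))) = true ↔
    ∃ j : Int, 0 ≤ j ∧ j < ((board[r.toNat]'(by omega)).toList.length : Int) ∧ j ≠ c ∧
      pvIsK board r j = true := by
  have hrn' : r.toNat < board.length := by omega
  have hget : PySem.List.pyGet? board r = some board[r.toNat] := by
    rw [PySem.List.pyGet?_of_nonneg board hr0, List.getElem?_eq_getElem hrn']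
  rw [hget]
  simp only [Option.getD_some]
  rw [List.any_eq_true]
  constructor
  · rintro ⟨p, hp, hpf⟩
    rw [PySem.List.mem_enumerate_iff] at hp
    obtain ⟨k, hk, rfl⟩ := hp
    simp only [Bool.and_eq_true, beq_iff_eq, decide_eq_true_eq, zero_add] at hpf
    refine ⟨(k : Int), by omega, by omega, by simpa using hpf.2, ?_⟩
    simp only [pvIsK, hget, Option.getD_some, PySem.List.pyGet?_natCast,
      List.getElem?_eq_getElem hk, beq_iff_eq]
    exact hpf.1
  · rintro ⟨j, hj0, hjm, hjc, hK⟩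
    have hjlt : j.toNat < (board[r.toNat]).toList.length := by omega
    refine ⟨(0 + (j.toNat : Int), (board[r.toNat]).toList[j.toNat]), ?_, ?_⟩
    · rw [PySem.List.mem_enumerate_iff]; exact ⟨j.toNat, hjlt, rfl⟩
    · simp only [pvIsK, hget, Option.getD_some, PySem.List.pyGet?_of_nonneg _ hj0,
        List.getElem?_eq_getElem hjlt, beq_iff_eq] at hK
      simp only [Bool.and_eq_true, beq_iff_eq, decide_eq_true_eq, zero_add]
      exact ⟨hK, by omega⟩

-- main bridge: on rectangular boards with the rook on the board the two ports agree
theorem pv_main (board : List String) (r c : Int)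
    (hrect : ∀ s ∈ board, s.toList.length = (board.headD "").toList.length)
    (hr0 : 0 ≤ r) (hrn : r < (board.length : Int))
    (hc0 : 0 ≤ c) (hcm : c < ((board.headD "").toList.length : Int)) :
    check_rook board "R" r c = check_rook_alt board "R" r c := by
  have hrn' : r.toNat < board.length := by omega
  have hrowlen : ((board[r.toNat]'hrn').toList.length) = (board.headD "").toList.length :=
    hrect _ (List.getElem_mem hrn')
  rw [Bool.eq_iff_iff, check_rook, check_rook_alt]
  simp only [beq_self_eq_true, if_true, bne_self_eq_false, Bool.false_eq_true, if_false,
    List.any_cons, List.any_nil, Bool.or_eq_true, or_false]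
  rw [pvWalk_up board _ _, pvWalk_down board _ _, pvWalk_left board _ _, pvWalk_right board _ _]
  simp only [add_zero]
  rw [pvRowscan board r c hr0 hrn, pvColscan board r c]
  constructor
  · rintro (⟨hc0', hcm', hr1, hr2, i, hi0, hir, hfu, hKi⟩ |
            ⟨hc0', hcm', hr1, hr2, i, hir, hin, hfu, hKi⟩ |
            ⟨hr0', hrn', hc1, hc2, j, hj0, hjc, hfu, hKj⟩ |
            ⟨hr0', hrn', hc1, hc2, j, hjc, hjm, hfu, hKj⟩)
    · exact Or.inr ⟨i, hi0, by omega, by omega, hKi⟩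
    · exact Or.inr ⟨i, by omega, hin, by omega, hKi⟩
    · exact Or.inl ⟨j, hj0, by omega, by omega, hKj⟩
    · exact Or.inl ⟨j, by omega, by omega, by omega, hKj⟩
  · rintro (⟨j, hj0, hjm, hjc, hK⟩ | ⟨i, hi0, hin, hir, hK⟩)
    · rw [hrowlen] at hjm
      rcases lt_or_gt_of_ne hjc with h | h
      · exact Or.inr (Or.inr (Or.inl
          ⟨hr0, hrn, by omega, by omega, j, hj0, by omega, by omega, hK⟩))
      · exact Or.inr (Or.inr (Or.inr
          ⟨hr0, hrn, by omega, by omega, j, by omega, by omega, by omega, hK⟩))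
    · rcases lt_or_gt_of_ne hir with h | h
      · exact Or.inl ⟨hc0, hcm, by omega, by omega, i, hi0, by omega, by omega, hK⟩
      · exact Or.inr (Or.inl ⟨hc0, hcm, by omega, by omega, i, by omega, hin, by omega, hK⟩)

-- ===== VERDICT (by name: the statement is the Claim_ definition above) =====
theorem check_rook_spec : Claim_equal_check_rook := by
  intro board piece r c _hdom hpre
  unfold Spec_check_rook
  by_cases hp : piece = "R"
  · subst hp
    rcases hpre with hpre | ⟨hrect, hr0, hrn, hc0, hcm⟩
    · exact absurd rfl hpre
    · exact pv_main board r c hrect hr0 hrn hc0 hcm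
  · rw [check_rook, check_rook_alt]
    simp [hp]
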